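-- pv_equiv track=rewrite | github.com/KorkaHajnalka/TowersFromCubes | TowersFromCubes.py | CalculateSurface
-- ===== SOURCE A (Python) =====
-- def CalculateSurface(ListOfIntegers):
--
-- # If ListOfIntegers contains negative number or zero or type of list elements are not integers
-- # then this function returns with -1 as the whole surface of the created objectum is invalid in these cases.
-- # Otherwise it returns calculated surface.
--
--     Surface = 0
--     LastPartialSurface = 0;
--
--     # Iterate over towers
--     for i in range(len(ListOfIntegers)-1):
--             # Chechk wheter type of elements are int and positive.
--             if (isinstance(ListOfIntegers[i], int) == False or isinstance(ListOfIntegers[i+1], int) == False or ListOfIntegers[i] < 0 or ListOfIntegers[i+1] < 0):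
--                 Surface = -1
--                 break
--             else:
--                 # Partial surfaces of towers
--                 PartialSurface = 4*ListOfIntegers[i]+2-2*min(ListOfIntegers[i],ListOfIntegers[i+1])
--
--                 # Surface of last tower
--                 if(i == len(ListOfIntegers)-2):
--                      LastPartialSurface = 4*ListOfIntegers[i+1]+2
--
--                 Surface += PartialSurface + LastPartialSurface
--
--     return Surface
-- ===== SOURCE B (Python) =====
-- def CalculateSurface(ListOfIntegers):
--     # Lists shorter than 2 are never validated and yield 0 (empty loop in A).
--     if len(ListOfIntegers) < 2:
--         return 0
--     # Validate in one pass: any non-int or negative element makes the surface invalid.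
--     for x in ListOfIntegers:
--         if not isinstance(x, int) or x < 0:
--             return -1
--     # Closed-form aggregate instead of a fused per-tower accumulation.
--     n = len(ListOfIntegers)
--     adjacent = sum(min(a, b) for a, b in zip(ListOfIntegers, ListOfIntegers[1:]))
--     return 4 * sum(ListOfIntegers) + 2 * n - 2 * adjacent
-- ===== Notes on version B (the rewrite author's own statement) =====
-- stated objective: simpler
-- what changed: Replaces the fused per-tower loop with break/last-tower bookkeeping by an early length guard, a single validation pass, and a closed-form aggregate 4*sum + 2*n - 2*sum(adjacent mins).
import Mathlib
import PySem

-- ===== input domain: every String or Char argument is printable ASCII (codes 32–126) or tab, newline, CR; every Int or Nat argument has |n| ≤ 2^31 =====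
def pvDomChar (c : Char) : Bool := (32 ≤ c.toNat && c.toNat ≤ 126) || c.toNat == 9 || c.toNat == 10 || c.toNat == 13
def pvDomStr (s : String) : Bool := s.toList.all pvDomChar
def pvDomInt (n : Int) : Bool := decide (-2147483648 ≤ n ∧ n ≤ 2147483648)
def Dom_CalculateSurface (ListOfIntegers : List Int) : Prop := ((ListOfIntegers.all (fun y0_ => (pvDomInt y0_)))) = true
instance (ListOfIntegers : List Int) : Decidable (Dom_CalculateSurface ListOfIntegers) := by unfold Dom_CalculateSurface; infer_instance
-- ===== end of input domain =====

-- B: early length guard + one validation pass + closed-form aggregate (simpler decomposition, same cost).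
-- ===== PORT A =====
-- A's for-loop over i in range(len-1) with state (Surface, LastPartialSurface) and break,
-- transcribed as structural recursion on the suffix starting at index i (rest = [] ⇔ i = len-2).
def CalculateSurfaceLoop : List Int → Int → Int → Int
  | a :: b :: rest, S, Last =>
    if a < 0 || b < 0 then -1
    else
      let P := 4 * a + 2 - 2 * min a b
      let Last' := if rest.isEmpty then 4 * b + 2 else Last
      CalculateSurfaceLoop (b :: rest) (S + P + Last') Last'
  | _, S, _ => S

def CalculateSurface (ListOfIntegers : List Int) : Int :=
  CalculateSurfaceLoop ListOfIntegers 0 0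

-- ===== PORT B =====
def CalculateSurface_alt (ListOfIntegers : List Int) : Int :=
  if ListOfIntegers.length < 2 then 0
  else if ListOfIntegers.any (fun x => decide (x < 0)) then -1
  else 4 * ListOfIntegers.sum + 2 * (ListOfIntegers.length : Int)
       - 2 * (List.zipWith min ListOfIntegers ListOfIntegers.tail).sum

-- ===== PRECONDITION & SPEC =====
def Spec_CalculateSurface (ListOfIntegers : List Int) (out : Int) : Prop := out = CalculateSurface_alt ListOfIntegers
instance (ListOfIntegers : List Int) (out : Int) : Decidable (Spec_CalculateSurface ListOfIntegers out) := by unfold Spec_CalculateSurface; infer_instance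

-- ===== CLAIM (what is proved, stated in full; the proofs are below) =====
def Claim_equal_CalculateSurface : Prop := ∀ (ListOfIntegers : List Int), Dom_CalculateSurface ListOfIntegers → Spec_CalculateSurface ListOfIntegers (CalculateSurface ListOfIntegers)

-- ===== LEMMAS AND PROOFS =====

-- ===== VERDICT (by name: the statement is the Claim_ definition above) =====
lemma loop_neg (l : List Int) (S Last : Int) (h : ∃ x ∈ l, x < 0) (hl : 2 ≤ l.length) :
    CalculateSurfaceLoop l S Last = -1 := by
  induction l generalizing S Last with
  | nil => simp at hl
  | cons a t ih =>
    cases t with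
    | nil => simp at hl
    | cons b rest =>
      by_cases hab : a < 0 ∨ b < 0
      · simp only [CalculateSurfaceLoop]
        rw [if_pos (by rcases hab with hab | hab <;> simp [hab])]
      · push_neg at hab
        rcases h with ⟨x, hx, hxn⟩
        simp only [List.mem_cons] at hx
        have hneg : ∃ x ∈ b :: rest, x < 0 := by
          refine ⟨x, ?_, hxn⟩
          simp only [List.mem_cons]
          rcases hx with hx | hx | hx
          · omega
          · exact Or.inl hx
          · exact Or.inr hx
        have hrest : rest ≠ [] := by
          intro hc; subst hc
          rcases hx with hx | hx | hx <;> simp_all <;> omega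
        simp only [CalculateSurfaceLoop]
        rw [if_neg (by simp; omega)]
        exact ih _ _ hneg (by cases rest <;> simp_all)

lemma loop_pos (l : List Int) (S : Int) (h : ∀ x ∈ l, 0 ≤ x) (hl : 2 ≤ l.length) :
    CalculateSurfaceLoop l S 0 =
      S + 4 * l.sum + 2 * (l.length : Int) - 2 * (List.zipWith min l l.tail).sum := by
  induction l generalizing S with
  | nil => simp at hl
  | cons a t ih =>
    cases t with
    | nil => simp at hl
    | cons b rest =>
      have ha : 0 ≤ a := h a (by simp)
      have hb : 0 ≤ b := h b (by simp)
      simp only [CalculateSurfaceLoop]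
      rw [if_neg (by simp; omega)]
      cases rest with
      | nil =>
        simp [CalculateSurfaceLoop, List.sum_cons]
        ring
      | cons c rs =>
        rw [show (if (c :: rs : List Int).isEmpty = true then 4 * b + 2 else 0) = 0 from rfl]
        rw [ih _ (fun x hx => h x (List.mem_cons_of_mem a hx)) (by simp)]
        simp [List.sum_cons]
        push_cast
        ring

-- ===== VERDICT (by name: the statement is the Claim_ definition above) =====
theorem CalculateSurface_spec : Claim_equal_CalculateSurface := by
  intro l _
  unfold Spec_CalculateSurface CalculateSurface CalculateSurface_alt
  by_cases hl : l.length < 2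
  · rw [if_pos hl]
    match l, hl with
    | [], _ => rfl
    | [a], _ => rfl
  · rw [if_neg hl]
    push_neg at hl
    by_cases hneg : l.any (fun x => decide (x < 0))
    · rw [if_pos hneg]
      exact loop_neg l 0 0 (by simpa [List.any_eq_true, decide_eq_true_iff] using hneg) hl
    · rw [if_neg hneg]
      rw [loop_pos l 0 (by simp only [List.any_eq_true, decide_eq_true_iff, not_exists, not_and, not_lt] at hneg; exact hneg) hl]
      ring
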